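-- pv_equiv track=rewrite | github.com/WSm-77/text_algorithms | lab2/lab_2/z_algorithm.py | z_pattern_match
-- ===== SOURCE A (Python) =====
-- def length_of_common_prefix(str1: str, str2: str) -> int:
--     min_len = min(len(str1), len(str2))
--     for i in range(min_len):
--         if str1[i] != str2[i]:
--             return i
--     return min_len
--
-- def compute_z_array(s: str) -> list[int]:
--     """
--     Compute the Z array for a string.
--
--     The Z array Z[i] gives the length of the longest substring starting at position i
--     that is also a prefix of the string.
--
--     Args:
--         s: The input string
--
--     Returns:
--         The Z array for the string
--     """
--     # TODO: Implement the Z-array computation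
--     # For each position i:
--     # - Calculate the length of the longest substring starting at i that is also a prefix of s
--     # - Use the Z-box technique to avoid redundant character comparisons
--     # - Handle the cases when i is inside or outside the current Z-box
--
--     # str_len = len(s)
--
--     # res = [length_of_common_prefix(s[i:], s) for i in range(str_len)]
--     # res[0] = 0
--
--     # return res
--
--     z = [0] * len(s)
--
--     for k in range(1, len(s)):
--         z[k] = length_of_common_prefix(s[k:], s)
--
--     return z
--
-- def z_pattern_match(text: str, pattern: str) -> list[int]:
--     """
--     Use the Z algorithm to find all occurrences of a pattern in a text.
--
--     Args:
--         text: The text to search in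
--         pattern: The pattern to search for
--
--     Returns:
--         A list of starting positions (0-indexed) where the pattern was found in the text
--     """
--     # TODO: Implement pattern matching using the Z algorithm
--
--     text_len = len(text)
--     pattern_len = len(pattern)
--
--     if pattern_len == 0 or text_len < pattern_len:
--         return []
--
--     SPECIAL_CHAR = '\\'
--
--     # 1. Create a concatenated string: pattern + special_character + text
--     concatenated = pattern + SPECIAL_CHAR + text
--
--     # 2. Compute the Z array for this concatenated string
--     z_arr = compute_z_array(concatenated)
--
--     # 3. Find positions where Z[i] equals the pattern length
--     found_positions = [i for i, z_val in enumerate(z_arr) if z_val == pattern_len]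
--
--     # 4. Convert these positions in the concatenated string to positions in the original text
--     converted_positions = [pos - len(SPECIAL_CHAR) - pattern_len for pos in found_positions]
--
--     # 5. Return all positions where the pattern is found in the text
--     return converted_positions
-- ===== SOURCE B (Python) =====
-- def z_pattern_match(text: str, pattern: str) -> list[int]:
--     m = len(pattern)
--     n = len(text)
--     if m == 0 or n < m:
--         return []
--     s = pattern + '\\' + text
--     total = len(s)
--     z = [0] * total
--     l = r = 0
--     for k in range(1, total):
--         v = min(r - k, z[k - l]) if k < r else 0
--         while k + v < total and s[v] == s[k + v]:
--             v += 1
--         z[k] = v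
--         if k + v > r:
--             l, r = k, k + v
--     return [i - m - 1 for i in range(total) if z[i] == m]
-- ===== Notes on version B (the rewrite author's own statement) =====
-- stated objective: faster
-- what changed: B replaces A's quadratic Z-array construction (a fresh suffix slice and character-by-character common-prefix rescan for every position) by the standard linear Z-box algorithm that maintains the rightmost match window [l,r) and reuses previously computed Z values; the Z array and hence the output are identical.
import Mathlib
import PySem

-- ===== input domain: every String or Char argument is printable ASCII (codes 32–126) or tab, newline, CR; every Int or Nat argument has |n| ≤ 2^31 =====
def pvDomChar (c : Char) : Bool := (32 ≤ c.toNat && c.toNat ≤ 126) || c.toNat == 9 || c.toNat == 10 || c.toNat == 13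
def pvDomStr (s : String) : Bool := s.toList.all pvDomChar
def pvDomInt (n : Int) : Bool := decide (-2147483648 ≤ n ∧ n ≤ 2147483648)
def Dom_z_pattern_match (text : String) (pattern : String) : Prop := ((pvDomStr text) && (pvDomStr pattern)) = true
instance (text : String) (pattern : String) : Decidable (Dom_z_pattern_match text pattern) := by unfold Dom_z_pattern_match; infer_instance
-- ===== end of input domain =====

-- B replaces A's per-position suffix-slice common-prefix rescan by the standard linear Z-box
-- algorithm (window [l,r) reuse); same Z array, same output; objective: faster.


-- ===== PORT A =====
-- length_of_common_prefix: scan positions left to right, stop at first mismatch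
def pvLcp : List Char → List Char → Int
  | a :: as, b :: bs => if a ≠ b then 0 else 1 + pvLcp as bs
  | _, _ => 0

-- compute_z_array: z[0] stays 0, z[k] = length_of_common_prefix(s[k:], s) for k ≥ 1
def pvComputeZ (s : List Char) : List Int :=
  (List.range s.length).map (fun (k : Nat) => if k = 0 then (0 : Int) else pvLcp (PySem.List.slice s (some (k : Int)) none) s)

def z_pattern_match (text : String) (pattern : String) : List Int :=
  let t := text.toList
  let p := pattern.toList
  if p.length = 0 ∨ t.length < p.length then []
  else
    let concatenated := p ++ ('\\' :: t)
    let zArr := pvComputeZ concatenated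
    let found := ((PySem.List.enumerate zArr).filter (fun iv => iv.2 == (p.length : Int))).map (·.1)
    found.map (fun pos => pos - 1 - (p.length : Int))

-- ===== PORT B =====
-- the inner while loop: extend the match length v while s[v] == s[k+v]
def pvExtend (s : List Char) (k v : Nat) : Nat :=
  if h : k + v < s.length ∧ s.getD v ' ' = s.getD (k + v) ' ' then pvExtend s k (v + 1) else v
termination_by s.length - (k + v)
decreasing_by omega

-- one iteration of the Z-box loop; state = (z list so far, l, r)
def pvZStep (s : List Char) (st : List Nat × Nat × Nat) (k : Nat) : List Nat × Nat × Nat :=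
  let z := st.1
  let l := st.2.1
  let r := st.2.2
  let v0 := if k < r then min (r - k) (z.getD (k - l) 0) else 0
  let v := pvExtend s k v0
  if r < k + v then (z ++ [v], k, k + v) else (z ++ [v], l, r)

def pvZState (s : List Char) : List Nat × Nat × Nat :=
  (List.range' 1 (s.length - 1)).foldl (pvZStep s) ([0], 0, 0)

def z_pattern_match_alt (text : String) (pattern : String) : List Int :=
  let t := text.toList
  let p := pattern.toList
  let m := p.length
  if m = 0 ∨ t.length < m then []
  else
    let s := p ++ ('\\' :: t)
    let z := (pvZState s).1
    ((List.range s.length).filter (fun i => z.getD i 0 == m)).map (fun (i : Nat) => (i : Int) - (m : Int) - 1)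

-- ===== PRECONDITION & SPEC =====
def Spec_z_pattern_match (text : String) (pattern : String) (out : List Int) : Prop := out = z_pattern_match_alt text pattern
instance (text : String) (pattern : String) (out : List Int) : Decidable (Spec_z_pattern_match text pattern out) := by unfold Spec_z_pattern_match; infer_instance

-- ===== CLAIM (what is proved, stated in full; the proofs are below) =====
def Claim_equal_z_pattern_match : Prop := ∀ (text : String) (pattern : String), Dom_z_pattern_match text pattern → Spec_z_pattern_match text pattern (z_pattern_match text pattern)

-- ===== LEMMAS AND PROOFS =====

-- the true Z value at position k (as A computes it)
def pvZI (s : List Char) (k : Nat) : Int := if k = 0 then 0 else pvLcp (s.drop k) s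

theorem pvLcp_nonneg (a b : List Char) : 0 ≤ pvLcp a b := by
  induction a generalizing b with
  | nil => simp [pvLcp]
  | cons x xs ih =>
    cases b with
    | nil => simp [pvLcp]
    | cons y ys =>
      simp only [pvLcp]
      split
      · exact le_refl 0
      · have := ih ys; omega

theorem pvLcp_le_length (a b : List Char) : pvLcp a b ≤ (a.length : Int) := by
  induction a generalizing b with
  | nil => simp [pvLcp]
  | cons x xs ih =>
    cases b with
    | nil => simp [pvLcp]; positivity
    | cons y ys =>
      simp only [pvLcp, List.length_cons]
      split
      · push_cast; omega
      · have := ih ys; push_cast; omega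

theorem pvLcp_take (a b : List Char) (u : Nat) (h : (u : Int) ≤ pvLcp a b) :
    a.take u = b.take u := by
  induction u generalizing a b with
  | zero => simp
  | succ n ih =>
    cases a with
    | nil => exfalso; simp [pvLcp] at h; omega
    | cons x xs =>
      cases b with
      | nil => exfalso; simp [pvLcp] at h; omega
      | cons y ys =>
        simp only [pvLcp] at h
        by_cases hxy : x = y
        · subst hxy
          rw [if_neg (by simp)] at h
          simp only [List.take_succ_cons, List.cons.injEq, true_and]
          exact ih xs ys (by push_cast at h ⊢; omega)
        · rw [if_pos hxy] at h; exfalso; omega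

theorem pvLcp_eq_iff (a b : List Char) (m : Nat) (hb : m < b.length) :
    pvLcp a b = (m : Int) ↔ (a.take m = b.take m ∧ m ≤ a.length ∧ a[m]? ≠ b[m]?) := by
  induction m generalizing a b with
  | zero =>
    cases a with
    | nil =>
      cases b with
      | nil => simp at hb
      | cons y ys => simp [pvLcp]
    | cons x xs =>
      cases b with
      | nil => simp at hb
      | cons y ys =>
        simp only [pvLcp, List.take_zero, List.getElem?_cons_zero, List.length_cons]
        constructor
        · intro h
          split at h
          · simp_all
          · exfalso; have := pvLcp_nonneg xs ys; omega
        · rintro ⟨-, -, hne⟩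
          have : x ≠ y := by intro he; exact hne (by simp [he])
          simp [this]
  | succ n ih =>
    cases a with
    | nil =>
      cases b with
      | nil => simp at hb
      | cons y ys =>
        simp only [pvLcp, List.take_nil, List.length_nil]
        constructor
        · intro h; exfalso; omega
        · rintro ⟨h, h2, -⟩
          exfalso
          have : (List.take (n+1) (y :: ys)).length = 0 := by rw [← h]; simp
          simp only [List.length_take, List.length_cons] at this
          omega
    | cons x xs =>
      cases b with
      | nil => simp at hb
      | cons y ys =>
        simp only [List.length_cons, Nat.succ_lt_succ_iff] at hb
        by_cases hxy : x = y
        · subst hxy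
          simp only [pvLcp, ne_eq, not_true_eq_false, if_false, List.take_succ_cons,
            List.getElem?_cons_succ, List.length_cons, List.cons.injEq, true_and,
            Nat.add_le_add_iff_right]
          have hiff : 1 + pvLcp xs ys = ((n + 1 : Nat) : Int) ↔ pvLcp xs ys = (n : Int) := by
            push_cast; omega
          rw [hiff]
          exact ih xs ys hb
        · rw [pvLcp.eq_def]
          simp only []
          rw [if_pos hxy]
          constructor
          · intro h; exfalso; omega
          · rintro ⟨h, -, -⟩
            simp only [List.take_succ_cons, List.cons.injEq] at h
            exact absurd h.1 hxy

-- enumerate of a map over List.range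
theorem enum_map_range (f : Nat → Int) (n : Nat) :
    PySem.List.enumerate ((List.range n).map f) 0 = (List.range n).map (fun k : Nat => ((k : Int), f k)) := by
  induction n with
  | zero => simp [PySem.List.enumerate_nil]
  | succ n ih =>
    rw [List.range_succ, List.map_append, List.map_append, PySem.List.enumerate_append, ih]
    simp [PySem.List.enumerate_cons, PySem.List.enumerate_nil]

-- the while loop computes the true common-prefix length, given that the first v characters match
theorem pvExtend_eq (s : List Char) (k v : Nat) (hk : 1 ≤ k)
    (hb : k + v ≤ s.length) (h : (s.drop k).take v = s.take v) :
    ((pvExtend s k v : Nat) : Int) = pvLcp (s.drop k) s := by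
  rw [pvExtend]
  split
  · rename_i hc
    obtain ⟨hlt, heq⟩ := hc
    have hvlen : v < s.length := by omega
    have hstep : (s.drop k).take (v + 1) = s.take (v + 1) := by
      rw [List.take_add_one, List.take_add_one, h]
      have h1 : (s.drop k)[v]? = s[k + v]? := by rw [List.getElem?_drop]
      have h2 : s[k + v]? = some (s.getD (k + v) ' ') := by
        rw [List.getD_eq_getElem?_getD, List.getElem?_eq_getElem hlt]; simp
      have h3 : s[v]? = some (s.getD v ' ') := by
        rw [List.getD_eq_getElem?_getD, List.getElem?_eq_getElem hvlen]; simp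
      rw [h1, h2, h3, heq]
    exact pvExtend_eq s k (v + 1) hk (by omega) hstep
  · rename_i hc
    rw [Decidable.not_and_iff_not_or_not] at hc
    have hvlt : v < s.length := by omega
    symm
    rw [pvLcp_eq_iff (s.drop k) s v hvlt]
    refine ⟨h, by simp; omega, ?_⟩
    by_cases hklt : k + v < s.length
    · -- in range: the characters must mismatch
      have hne : ¬ s.getD v ' ' = s.getD (k + v) ' ' := by
        rcases hc with hge | hne
        · omega
        · exact hne
      have h1 : (s.drop k)[v]? = s[k + v]? := by rw [List.getElem?_drop]
      rw [h1, List.getElem?_eq_getElem hklt, List.getElem?_eq_getElem hvlt]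
      intro hcontra
      apply hne
      have he := Option.some.inj hcontra
      rw [List.getD_eq_getElem?_getD, List.getD_eq_getElem?_getD,
        List.getElem?_eq_getElem hklt, List.getElem?_eq_getElem hvlt]
      simp [he]
    · -- past the end: (s.drop k)[v]? = none
      have h1 : (s.drop k)[v]? = none := by
        rw [List.getElem?_eq_none]
        simp; omega
      rw [h1, List.getElem?_eq_getElem hvlt]
      simp
termination_by s.length - (k + v)
decreasing_by omega

-- loop invariant: z holds the true Z values for positions < c, and (l, r) is a valid Z-box
def pvInv (s : List Char) (c : Nat) (st : List Nat × Nat × Nat) : Prop :=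
  st.1.length = c ∧
  (∀ i, i < c → ((st.1.getD i 0 : Nat) : Int) = pvZI s i) ∧
  ((st.2.1 = 0 ∧ st.2.2 = 0) ∨
    (1 ≤ st.2.1 ∧ st.2.1 < c ∧ st.2.1 ≤ st.2.2 ∧ st.2.2 ≤ s.length ∧
      (s.drop st.2.1).take (st.2.2 - st.2.1) = s.take (st.2.2 - st.2.1)))

theorem pvZStep_inv (s : List Char) (k : Nat) (st : List Nat × Nat × Nat)
    (hk : 1 ≤ k) (hkL : k < s.length) (hinv : pvInv s k st) :
    pvInv s (k + 1) (pvZStep s st k) := by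
  obtain ⟨hlen, hz, hbox⟩ := hinv
  obtain ⟨z, l, r⟩ := st
  simp only at hlen hz hbox
  have hstart : ∀ v0 : Nat, v0 = (if k < r then min (r - k) (z.getD (k - l) 0) else 0) →
      (s.drop k).take v0 = s.take v0 := by
    intro v0 hv0
    by_cases hkr : k < r
    · rw [if_pos hkr] at hv0
      rcases hbox with ⟨hl0, hr0⟩ | ⟨hl1, hlc, hlr, hrs, hpref⟩
      · omega
      · set j := k - l with hj
        have hj1 : 1 ≤ j := by omega
        have hjc : j < k := by omega
        have hzj : ((z.getD j 0 : Nat) : Int) = pvLcp (s.drop j) s := by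
          rw [hz j hjc, pvZI, if_neg (by omega)]
        have hv0z : (v0 : Int) ≤ pvLcp (s.drop j) s := by
          rw [← hzj]
          have : v0 ≤ z.getD j 0 := hv0 ▸ min_le_right _ _
          exact_mod_cast this
        have hjv : j + v0 ≤ r - l := by
          have : v0 ≤ r - k := hv0 ▸ min_le_left _ _
          omega
        have h1 : s.take v0 = (s.drop j).take v0 := (pvLcp_take _ _ _ hv0z).symm
        have hdk : s.drop k = (s.drop l).drop j := by rw [List.drop_drop]; congr 1; omega
        have h2 : (s.drop k).take v0 = (s.drop j).take v0 := by
          calc (s.drop k).take v0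
              = ((s.drop l).drop j).take v0 := by rw [hdk]
            _ = (((s.drop l).drop j).take (r - l - j)).take v0 := by
                rw [List.take_take, min_eq_left (by omega)]
            _ = (((s.drop l).take (r - l)).drop j).take v0 := by rw [List.drop_take]
            _ = ((s.take (r - l)).drop j).take v0 := by rw [hpref]
            _ = ((s.drop j).take (r - l - j)).take v0 := by rw [List.drop_take]
            _ = (s.drop j).take v0 := by rw [List.take_take, min_eq_left (by omega)]
        rw [h2, h1]
    · rw [if_neg hkr] at hv0; subst hv0; simp
  unfold pvZStep
  simp only
  set v0 := if k < r then min (r - k) (z.getD (k - l) 0) else 0 with hv0def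
  set v := pvExtend s k v0 with hvdef
  have hv0b : k + v0 ≤ s.length := by
    by_cases hkr : k < r
    · rcases hbox with ⟨hl0, hr0⟩ | ⟨hl1, hlc, hlr, hrs, hpref⟩
      · omega
      · have hle : v0 ≤ r - k := by rw [hv0def, if_pos hkr]; exact min_le_left _ _
        omega
    · have hle : v0 = 0 := by rw [hv0def, if_neg hkr]
      omega
  have hveq : ((v : Nat) : Int) = pvLcp (s.drop k) s :=
    pvExtend_eq s k v0 hk hv0b (hstart v0 hv0def)
  have hzk : ((v : Nat) : Int) = pvZI s k := by rw [hveq, pvZI, if_neg (by omega)]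
  have hvlen : (v : Int) ≤ ((s.length - k : Nat) : Int) := by
    rw [hveq]
    calc pvLcp (s.drop k) s ≤ ((s.drop k).length : Int) := pvLcp_le_length _ _
      _ = ((s.length - k : Nat) : Int) := by simp
  have hvN : v ≤ s.length - k := by exact_mod_cast hvlen
  have hkv : k + v ≤ s.length := by omega
  have hlen' : (z ++ [v]).length = k + 1 := by simp [hlen]
  have hz' : ∀ i, i < k + 1 → (((z ++ [v]).getD i 0 : Nat) : Int) = pvZI s i := by
    intro i hi
    by_cases hik : i < k
    · rw [List.getD_eq_getElem?_getD, List.getElem?_append_left (by omega),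
        ← List.getD_eq_getElem?_getD]
      exact hz i hik
    · have hieq : i = k := by omega
      subst hieq
      rw [List.getD_eq_getElem?_getD, ← hlen, List.getElem?_concat_length]
      simpa [hlen] using hzk
  split
  · -- new box (k, k + v)
    refine ⟨hlen', hz', Or.inr ⟨hk, Nat.lt_succ_self k, Nat.le_add_right k v, hkv, ?_⟩⟩
    show (s.drop k).take ((k + v) - k) = s.take ((k + v) - k)
    have hsub : (k + v) - k = v := by omega
    rw [hsub]
    exact pvLcp_take (s.drop k) s v (le_of_eq hveq)
  · -- keep old box
    refine ⟨hlen', hz', ?_⟩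
    rcases hbox with ⟨hl0, hr0⟩ | ⟨hl1, hlc, hlr, hrs, hpref⟩
    · left; exact ⟨hl0, hr0⟩
    · right; exact ⟨hl1, Nat.lt_succ_of_lt hlc, hlr, hrs, hpref⟩

theorem pvFold_inv (s : List Char) (n : Nat) :
    ∀ (a : Nat) (st : List Nat × Nat × Nat), 1 ≤ a → a + n ≤ s.length → pvInv s a st →
      pvInv s (a + n) ((List.range' a n).foldl (pvZStep s) st) := by
  induction n with
  | zero => intro a st _ _ h; simpa using h
  | succ n ih =>
    intro a st ha hb h
    rw [List.range'_succ, List.foldl_cons]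
    have hstep := pvZStep_inv s a st ha (by omega) h
    have := ih (a + 1) (pvZStep s st a) (by omega) (by omega) hstep
    have harith : a + 1 + n = a + (n + 1) := by omega
    rwa [harith] at this

theorem pvZState_spec (s : List Char) (hs : 1 ≤ s.length) :
    (pvZState s).1.length = s.length ∧
    ∀ i, i < s.length → (((pvZState s).1.getD i 0 : Nat) : Int) = pvZI s i := by
  have hinit : pvInv s 1 (([0], 0, 0) : List Nat × Nat × Nat) := by
    refine ⟨rfl, ?_, Or.inl ⟨rfl, rfl⟩⟩
    intro i hi
    have : i = 0 := by omega
    subst this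
    simp [pvZI]
  have := pvFold_inv s (s.length - 1) 1 ([0], 0, 0) (le_refl 1) (by omega) hinit
  rw [show 1 + (s.length - 1) = s.length by omega] at this
  exact ⟨this.1, this.2.1⟩

-- ===== VERDICT (by name: the statement is the Claim_ definition above) =====
theorem main_lists (p t : List Char) (hm : 1 ≤ p.length) :
    ((((PySem.List.enumerate (pvComputeZ (p ++ ('\\' :: t)))).filter
        (fun iv => iv.2 == (p.length : Int))).map (·.1)).map (fun pos => pos - 1 - (p.length : Int)))
    = ((List.range (p ++ ('\\' :: t)).length).filter
        (fun i => (pvZState (p ++ ('\\' :: t))).1.getD i 0 == p.length)).map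
        (fun (i : Nat) => (i : Int) - (p.length : Int) - 1) := by
  set s := p ++ ('\\' :: t) with hs
  have hslen : 1 ≤ s.length := by rw [hs]; simp only [List.length_append, List.length_cons]; omega
  obtain ⟨hzlen, hzval⟩ := pvZState_spec s hslen
  have hcompute : pvComputeZ s = (List.range s.length).map (pvZI s) := by
    unfold pvComputeZ pvZI
    refine List.map_congr_left (fun k _ => ?_)
    by_cases hk : k = 0
    · simp [hk]
    · rw [if_neg hk, if_neg hk, PySem.List.slice_from_natCast]
  rw [hcompute, enum_map_range, List.filter_map, List.map_map, List.map_map]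
  have hpred : ∀ k ∈ List.range s.length,
      ((fun iv : Int × Int => iv.2 == (p.length : Int)) ∘ (fun k : Nat => ((k : Int), pvZI s k))) k
        = ((pvZState s).1.getD k 0 == p.length) := by
    intro k hk
    have hklt : k < s.length := List.mem_range.mp hk
    have hv := hzval k hklt
    simp only [Function.comp_apply]
    rw [Bool.eq_iff_iff, beq_iff_eq, beq_iff_eq]
    constructor
    · intro h
      have h2 : (((pvZState s).1.getD k 0 : Nat) : Int) = ((p.length : Nat) : Int) := by rw [hv, h]
      exact_mod_cast h2
    · intro h
      rw [← hv]
      exact_mod_cast h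
  rw [List.filter_congr hpred]
  refine List.map_congr_left (fun k _ => ?_)
  simp only [Function.comp_apply]
  omega

theorem z_pattern_match_spec : Claim_equal_z_pattern_match := by
  unfold Claim_equal_z_pattern_match Spec_z_pattern_match
  intro text pattern _
  unfold z_pattern_match z_pattern_match_alt
  by_cases hc : pattern.toList.length = 0 ∨ text.toList.length < pattern.toList.length
  · rw [if_pos hc, if_pos hc]
  · rw [if_neg hc, if_neg hc]
    exact main_lists pattern.toList text.toList
      (Nat.one_le_iff_ne_zero.mpr (fun h => hc (Or.inl h)))
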